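-- pv_equiv track=rewrite | github.com/yasirbeydiligit/eduai-platform | ml/training/data_prep.py | apply_quality_filters
-- ===== SOURCE A (Python) =====
-- def apply_quality_filters(
--     records: list[dict],
--     min_output_len: int = 20,
--     max_output_len: int = 1000,
-- ) -> tuple[list[dict], dict[str, int]]:
--     """Uzunluk + exact duplicate instruction filtreleri.
--
--     Returns:
--         (geçen kayıtlar, her filtre türünün elediği sayı)
--     """
--     stats = {"length": 0, "exact_duplicate": 0}
--     seen_instructions: set[str] = set()
--     clean: list[dict] = []
--
--     for rec in records:
--         out_len = len(rec["output"])
--         if out_len < min_output_len or out_len > max_output_len: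
--             stats["length"] += 1
--             continue
--
--         # Normalize et (whitespace + lowercase) — yüzeysel dedup
--         key = " ".join(rec["instruction"].lower().split())
--         if key in seen_instructions:
--             stats["exact_duplicate"] += 1
--             continue
--         seen_instructions.add(key)
--         clean.append(rec)
--
--     return clean, stats
-- ===== SOURCE B (Python) =====
-- def apply_quality_filters(
--     records: list[dict],
--     min_output_len: int = 20,
--     max_output_len: int = 1000,
-- ) -> tuple[list[dict], dict[str, int]]:
--     """Two-pass rewrite: length-filter into survivors, then first-seen dedup via
--     dict.setdefault; the stats are recovered by length arithmetic."""
--     survivors = [rec for rec in records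
--                  if min_output_len <= len(rec["output"]) <= max_output_len]
--     firsts = {}
--     for rec in survivors:
--         firsts.setdefault(" ".join(rec["instruction"].lower().split()), rec)
--     clean = list(firsts.values())
--     return clean, {"length": len(records) - len(survivors),
--                    "exact_duplicate": len(survivors) - len(clean)}
-- ===== Notes on version B (the rewrite author's own statement) =====
-- stated objective: alternative
-- what changed: A's single fused loop with two in-loop counters, a seen-set and list appends is replaced by two separate passes: a length filter into a survivors list, then first-seen dedup via dict.setdefault taking the dict's values, with both stats recovered afterwards by length arithmetic.
import Mathlib
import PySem

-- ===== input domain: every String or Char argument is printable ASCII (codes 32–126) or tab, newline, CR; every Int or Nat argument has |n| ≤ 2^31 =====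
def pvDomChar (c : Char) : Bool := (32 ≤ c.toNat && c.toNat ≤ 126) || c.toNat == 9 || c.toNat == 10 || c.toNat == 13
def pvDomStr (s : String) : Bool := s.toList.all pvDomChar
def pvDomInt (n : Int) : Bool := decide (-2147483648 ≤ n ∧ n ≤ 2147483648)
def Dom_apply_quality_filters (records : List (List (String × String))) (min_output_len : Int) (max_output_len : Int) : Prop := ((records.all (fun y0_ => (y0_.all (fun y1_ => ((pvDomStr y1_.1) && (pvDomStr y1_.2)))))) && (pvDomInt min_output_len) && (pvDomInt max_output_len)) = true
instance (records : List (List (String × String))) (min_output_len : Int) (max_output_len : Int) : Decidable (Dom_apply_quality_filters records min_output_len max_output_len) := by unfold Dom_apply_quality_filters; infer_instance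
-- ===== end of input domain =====

-- B changes the decomposition (two passes: a length filter, then first-seen dedup through a
-- dict built with setdefault, with the two stats recovered by length arithmetic); objective: alternative.

-- len(rec["output"]) (Pre_ guarantees the key is present; getD's default is never used inside Pre_)
def pvOutLen (rec : List (String × String)) : Int :=
  PySem.Str.len ((PySem.Dict.mk rec).getD "output" "")

-- ' '.join(rec["instruction"].lower().split())
def pvKey (rec : List (String × String)) : String :=
  PySem.Str.join " " (PySem.Str.split₀ (PySem.Str.lower ((PySem.Dict.mk rec).getD "instruction" "")))

-- ===== PORT A =====
def aLoop (min_output_len max_output_len : Int)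
    (records : List (List (String × String)))
    (seen : PySem.Set String) (lenCt dupCt : Int)
    (clean : List (List (String × String))) :
    (List (List (String × String))) × (List (String × Int)) :=
  match records with
  | [] => (clean, [("length", lenCt), ("exact_duplicate", dupCt)])
  | rec :: rest =>
    if pvOutLen rec < min_output_len ∨ pvOutLen rec > max_output_len then
      aLoop min_output_len max_output_len rest seen (lenCt + 1) dupCt clean
    else if PySem.Set.contains seen (pvKey rec) then
      aLoop min_output_len max_output_len rest seen lenCt (dupCt + 1) clean
    else
      aLoop min_output_len max_output_len rest (PySem.Set.add seen (pvKey rec)) lenCt dupCt (clean ++ [rec])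

def apply_quality_filters (records : List (List (String × String))) (min_output_len : Int) (max_output_len : Int) : (List (List (String × String))) × (List (String × Int)) :=
  aLoop min_output_len max_output_len records PySem.Set.empty 0 0 []

-- ===== PORT B =====
def apply_quality_filters_alt (records : List (List (String × String))) (min_output_len : Int) (max_output_len : Int) : (List (List (String × String))) × (List (String × Int)) :=
  let survivors := records.filter
    (fun rec => decide (min_output_len ≤ pvOutLen rec ∧ pvOutLen rec ≤ max_output_len))
  let firsts := survivors.foldl
    (fun d rec => PySem.Dict.setdefault d (pvKey rec) rec)
    (PySem.Dict.empty : PySem.Dict String (List (String × String)))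
  let clean := firsts.values
  (clean, [("length", (records.length : Int) - (survivors.length : Int)),
           ("exact_duplicate", (survivors.length : Int) - (clean.length : Int))])

-- ===== PRECONDITION & SPEC =====
-- Pre_ excludes exactly the inputs where the Python A raises KeyError: a record without an
-- "output" key, or a record passing the length filter without an "instruction" key.
def Pre_apply_quality_filters (records : List (List (String × String))) (min_output_len : Int) (max_output_len : Int) : Prop :=
  ∀ rec ∈ records,
    (PySem.Dict.mk rec).contains "output" = true ∧
    (min_output_len ≤ pvOutLen rec ∧ pvOutLen rec ≤ max_output_len →
      (PySem.Dict.mk rec).contains "instruction" = true)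
instance (records : List (List (String × String))) (min_output_len : Int) (max_output_len : Int) : Decidable (Pre_apply_quality_filters records min_output_len max_output_len) := by unfold Pre_apply_quality_filters; infer_instance

def pvWitness_apply_quality_filters : (List (List (String × String))) × Int × Int :=
  ([[("output", "abcd"), ("instruction", "Say  HI")],
    [("output", "xy"), ("instruction", "say hi")],
    [("output", "toolongxx"), ("instruction", "other")]], 1, 6)

def Spec_apply_quality_filters (records : List (List (String × String))) (min_output_len : Int) (max_output_len : Int) (out : (List (List (String × String))) × (List (String × Int))) : Prop := out = apply_quality_filters_alt records min_output_len max_output_len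
instance (records : List (List (String × String))) (min_output_len : Int) (max_output_len : Int) (out : (List (List (String × String))) × (List (String × Int))) : Decidable (Spec_apply_quality_filters records min_output_len max_output_len out) := by unfold Spec_apply_quality_filters; infer_instance

-- ===== CLAIM (what is proved, stated in full; the proofs are below) =====
def Claim_equal_apply_quality_filters : Prop := ∀ (records : List (List (String × String))) (min_output_len : Int) (max_output_len : Int), Dom_apply_quality_filters records min_output_len max_output_len → Pre_apply_quality_filters records min_output_len max_output_len → Spec_apply_quality_filters records min_output_len max_output_len (apply_quality_filters records min_output_len max_output_len)

-- ===== LEMMAS AND PROOFS =====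

-- B's dedup fold, generalized over the start dict, running over ALL records with the length
-- test inlined (bridged to B's filter-then-fold form by foldl_ite_eq_foldl_filter).
def bFold (min_output_len max_output_len : Int)
    (records : List (List (String × String)))
    (d : PySem.Dict String (List (String × String))) :
    PySem.Dict String (List (String × String)) :=
  records.foldl
    (fun d rec =>
      if min_output_len ≤ pvOutLen rec ∧ pvOutLen rec ≤ max_output_len then
        PySem.Dict.setdefault d (pvKey rec) rec
      else d) d

lemma pvCountP_split {α : Type} (l : List α) (p : α → Prop) [DecidablePred p] :
    l.countP (fun x => decide ¬ p x) + l.countP (fun x => decide (p x)) = l.length := by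
  induction l with
  | nil => simp
  | cons a t ih =>
    simp only [List.countP_cons, decide_not] at *
    by_cases h : p a <;> simp [h] <;> omega

lemma aLoop_eq (min_output_len max_output_len : Int)
    (records : List (List (String × String))) :
    ∀ (seen : PySem.Set String) (d : PySem.Dict String (List (String × String)))
      (lenCt dupCt : Int),
      (∀ k, PySem.Set.contains seen k = d.contains k) →
      d.keys.Nodup →
      aLoop min_output_len max_output_len records seen lenCt dupCt d.values =
        ((bFold min_output_len max_output_len records d).values,
         [("length", lenCt + (records.countP
            (fun rec => decide ¬(min_output_len ≤ pvOutLen rec ∧ pvOutLen rec ≤ max_output_len)) : Int)),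
          ("exact_duplicate", dupCt + (records.countP
            (fun rec => decide (min_output_len ≤ pvOutLen rec ∧ pvOutLen rec ≤ max_output_len)) : Int)
            - (((bFold min_output_len max_output_len records d).size : Int) - (d.size : Int)))]) := by
  induction records with
  | nil => intro seen d lenCt dupCt hc hnd; simp [aLoop, bFold]
  | cons rec rest ih =>
    intro seen d lenCt dupCt hc hnd
    by_cases hlen : min_output_len ≤ pvOutLen rec ∧ pvOutLen rec ≤ max_output_len
    · have hnot : ¬ (pvOutLen rec < min_output_len ∨ pvOutLen rec > max_output_len) := by
        omega
      rw [aLoop]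
      rw [if_neg hnot]
      by_cases hseen : PySem.Set.contains seen (pvKey rec) = true
      · have hcont : d.contains (pvKey rec) = true := (hc (pvKey rec)) ▸ hseen
        have hsd : PySem.Dict.setdefault d (pvKey rec) rec = d :=
          PySem.Dict.setdefault_of_contains d rec hcont
        rw [if_pos hseen]
        rw [ih seen d lenCt (dupCt + 1) hc hnd]
        simp only [bFold, List.foldl_cons, if_pos hlen, hsd]
        simp [hlen]
        omega
      · have hcontf : d.contains (pvKey rec) = false := by
          rw [← hc]; exact Bool.not_eq_true _ ▸ (by simpa using hseen)
        have hsd : PySem.Dict.setdefault d (pvKey rec) rec = d.insert (pvKey rec) rec :=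
          PySem.Dict.setdefault_of_not_contains d rec hcontf
        rw [if_neg hseen]
        have hvals : (d.insert (pvKey rec) rec).values = d.values ++ [rec] := by
          simp only [PySem.Dict.values, PySem.Dict.items_insert_of_not_contains _ _ hcontf,
            List.map_append, List.map_cons, List.map_nil]
        have hsz : (d.insert (pvKey rec) rec).size = d.size + 1 := by
          simp only [PySem.Dict.size, PySem.Dict.items_insert_of_not_contains _ _ hcontf,
            List.length_append, List.length_cons, List.length_nil]
        have hc' : ∀ k, PySem.Set.contains (PySem.Set.add seen (pvKey rec)) k
            = (d.insert (pvKey rec) rec).contains k := by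
          intro k
          rw [PySem.Dict.contains_insert]
          by_cases hk : k = pvKey rec
          · subst hk
            simp [PySem.Set.contains, PySem.Set.mem_add]
          · have hkb : (k == pvKey rec) = false := by simpa using hk
            rw [hkb, ← hc k]
            simp [PySem.Set.contains, PySem.Set.mem_add, hk]
        have hnd' : (d.insert (pvKey rec) rec).keys.Nodup :=
          PySem.Dict.nodup_keys_insert _ _ _ hnd
        rw [← hvals, ih _ _ lenCt dupCt hc' hnd']
        simp only [bFold, List.foldl_cons, if_pos hlen, hsd]
        simp [hlen, hsz]
        omega
    · have hor : pvOutLen rec < min_output_len ∨ pvOutLen rec > max_output_len := by omega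
      rw [aLoop, if_pos hor]
      rw [ih seen d (lenCt + 1) dupCt hc hnd]
      simp only [bFold, List.foldl_cons, if_neg hlen]
      simp [hlen, hor]
      omega

-- ===== VERDICT (by name: the statement is the Claim_ definition above) =====
theorem apply_quality_filters_spec : Claim_equal_apply_quality_filters := by
  intro records min_output_len max_output_len _ _
  unfold Spec_apply_quality_filters apply_quality_filters apply_quality_filters_alt
  have h := aLoop_eq min_output_len max_output_len records PySem.Set.empty
    (PySem.Dict.empty : PySem.Dict String (List (String × String))) 0 0
    (by intro k; simp [PySem.Set.empty, PySem.Set.contains, PySem.Dict.contains_empty])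
    (PySem.Dict.nodup_keys_empty)
  have hve : (PySem.Dict.empty : PySem.Dict String (List (String × String))).values = [] := rfl
  rw [hve] at h
  rw [h]
  have hbf : bFold min_output_len max_output_len records PySem.Dict.empty
      = (records.filter (fun rec => decide (min_output_len ≤ pvOutLen rec ∧ pvOutLen rec ≤ max_output_len))).foldl
          (fun d rec => PySem.Dict.setdefault d (pvKey rec) rec) PySem.Dict.empty := by
    unfold bFold
    exact PySem.List.foldl_ite_eq_foldl_filter _ _ _ _
  rw [hbf]
  refine Prod.ext rfl ?_
  simp only
  have hlen : (records.filter (fun rec => decide (min_output_len ≤ pvOutLen rec ∧ pvOutLen rec ≤ max_output_len))).length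
      = records.countP (fun rec => decide (min_output_len ≤ pvOutLen rec ∧ pvOutLen rec ≤ max_output_len)) :=
    List.countP_eq_length_filter.symm
  have hcnt : records.countP (fun rec => decide ¬(min_output_len ≤ pvOutLen rec ∧ pvOutLen rec ≤ max_output_len))
      + records.countP (fun rec => decide (min_output_len ≤ pvOutLen rec ∧ pvOutLen rec ≤ max_output_len))
      = records.length := by
    exact pvCountP_split records _
  have hsz : ∀ (d : PySem.Dict String (List (String × String))), d.size = d.values.length := by
    intro d; simp [PySem.Dict.size, PySem.Dict.values]
  rw [hlen, hsz]
  have hse : (PySem.Dict.empty : PySem.Dict String (List (String × String))).size = 0 := rfl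
  rw [hse]
  congr 1
  · congr 1; omega
  · congr 1; ring_nf
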